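-- pv_equiv track=rewrite | github.com/srlee056/algorithm-study | 백준/Silver/14889. 스타트와 링크/스타트와 링크.py | get_stat_diff
-- ===== SOURCE A (Python) =====
-- def get_stat_diff(arr, start, link):
--     sum_start, sum_link = 0, 0
--     for i in start:
--         for j in start:
--             if i != j:
--                 sum_start += arr[i][j]
--     for i in link:
--         for j in link:
--             if i != j:
--                 sum_link += arr[i][j]
--     return abs(sum_start-sum_link)
-- ===== SOURCE B (Python) =====
-- def _team_stat(arr, team):
--     # build a multiplicity index once, then combine distinct values weighted by counts
--     cnt = {}
--     for x in team:
--         cnt[x] = cnt.get(x, 0) + 1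
--     vals = list(cnt)
--     total = 0
--     for u in vals:
--         for v in vals:
--             if u != v:
--                 total += cnt[u] * cnt[v] * arr[u][v]
--     return total
--
--
-- def get_stat_diff(arr, start, link):
--     return abs(_team_stat(arr, start) - _team_stat(arr, link))
-- ===== Notes on version B (the rewrite author's own statement) =====
-- stated objective: faster
-- what changed: B builds a multiplicity map of each team once and sums cnt[u]*cnt[v]*arr[u][v] over DISTINCT value pairs, replacing A's double scan over the raw team lists; each matrix entry is read once regardless of duplicates.
import Mathlib
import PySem

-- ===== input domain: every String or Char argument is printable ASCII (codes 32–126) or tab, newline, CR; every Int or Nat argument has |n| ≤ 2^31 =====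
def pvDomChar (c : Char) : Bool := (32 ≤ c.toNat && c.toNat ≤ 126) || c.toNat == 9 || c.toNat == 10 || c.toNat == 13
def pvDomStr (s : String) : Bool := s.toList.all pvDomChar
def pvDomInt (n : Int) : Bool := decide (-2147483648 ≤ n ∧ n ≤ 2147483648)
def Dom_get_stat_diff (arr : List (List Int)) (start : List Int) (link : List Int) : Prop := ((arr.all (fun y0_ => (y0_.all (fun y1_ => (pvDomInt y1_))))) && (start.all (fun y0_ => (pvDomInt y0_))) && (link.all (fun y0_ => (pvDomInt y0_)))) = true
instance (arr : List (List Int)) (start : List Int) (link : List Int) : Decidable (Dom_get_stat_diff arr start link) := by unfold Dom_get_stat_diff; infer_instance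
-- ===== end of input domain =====

-- B builds a multiplicity map of each team once and sums cnt[u]*cnt[v]*arr[u][v] over
-- DISTINCT value pairs, replacing A's double scan over the raw team lists (objective: faster on duplicate-heavy teams: O(n + d^2) vs O(n^2), d = distinct values).

-- arr[i][j] (Python indexing, negatives from the end); total via default 0, exact under Pre_
def pvGetv (arr : List (List Int)) (i j : Int) : Int :=
  PySem.List.pyGetD (PySem.List.pyGetD arr i []) j 0

-- ===== PORT A =====
def get_stat_diff (arr : List (List Int)) (start : List Int) (link : List Int) : Int :=
  let sum_start : Int :=
    start.foldl (fun s i =>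
      start.foldl (fun s j => if i ≠ j then s + pvGetv arr i j else s) s) 0
  let sum_link : Int :=
    link.foldl (fun s i =>
      link.foldl (fun s j => if i ≠ j then s + pvGetv arr i j else s) s) 0
  |sum_start - sum_link|

-- ===== PORT B =====
-- cnt[x] = cnt.get(x, 0) + 1 loop; getD 0 is exact since the looked-up keys are present
def pvTeamStat (arr : List (List Int)) (team : List Int) : Int :=
  let cnt : PySem.Dict Int Int :=
    team.foldl (fun d x => d.insert x (d.getD x 0 + 1)) PySem.Dict.empty
  let vals := cnt.keys
  vals.foldl (fun s u =>
    vals.foldl (fun s v =>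
      if u ≠ v then s + cnt.getD u 0 * cnt.getD v 0 * pvGetv arr u v else s) s) 0

def get_stat_diff_alt (arr : List (List Int)) (start : List Int) (link : List Int) : Int :=
  |pvTeamStat arr start - pvTeamStat arr link|

-- ===== PRECONDITION & SPEC =====
-- Pre_ excludes exactly the inputs where Python A raises IndexError: some access
-- arr[i][j] that A actually performs (i, j in the same team, i ≠ j) is out of range.
def Pre_get_stat_diff (arr : List (List Int)) (start : List Int) (link : List Int) : Prop :=
  (∀ i ∈ start, ∀ j ∈ start, i ≠ j →
    ((PySem.List.pyGet? arr i).bind (fun row => PySem.List.pyGet? row j)).isSome = true) ∧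
  (∀ i ∈ link, ∀ j ∈ link, i ≠ j →
    ((PySem.List.pyGet? arr i).bind (fun row => PySem.List.pyGet? row j)).isSome = true)
instance (arr : List (List Int)) (start : List Int) (link : List Int) : Decidable (Pre_get_stat_diff arr start link) := by unfold Pre_get_stat_diff; infer_instance

def pvWitness_get_stat_diff : List (List Int) × List Int × List Int :=
  ([[0, 1], [2, 0]], [0, 1], [])

def Spec_get_stat_diff (arr : List (List Int)) (start : List Int) (link : List Int) (out : Int) : Prop := out = get_stat_diff_alt arr start link
instance (arr : List (List Int)) (start : List Int) (link : List Int) (out : Int) : Decidable (Spec_get_stat_diff arr start link out) := by unfold Spec_get_stat_diff; infer_instance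

-- ===== CLAIM (what is proved, stated in full; the proofs are below) =====
def Claim_equal_get_stat_diff : Prop := ∀ (arr : List (List Int)) (start : List Int) (link : List Int), Dom_get_stat_diff arr start link → Pre_get_stat_diff arr start link → Spec_get_stat_diff arr start link (get_stat_diff arr start link)

-- ===== LEMMAS AND PROOFS =====

theorem pv_foldl_add_int {α : Type} (g : α → Int) (l : List α) (a : Int) :
    l.foldl (fun s x => s + g x) a = a + (l.map g).sum := by
  induction l generalizing a with
  | nil => simp
  | cons x xs ih => simp [List.foldl_cons, ih]; ring

-- an if-guarded accumulating fold is a sum of guarded terms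
theorem pv_foldl_if_add {α : Type} (p : α → Prop) [DecidablePred p] (g : α → Int)
    (l : List α) (a : Int) :
    l.foldl (fun s x => if p x then s + g x else s) a
      = a + (l.map (fun x => if p x then g x else 0)).sum := by
  have : (fun s x => if p x then s + g x else s)
      = (fun s x => s + (if p x then g x else 0)) := by
    funext s x; split <;> simp
  rw [this, pv_foldl_add_int]

-- on a nodup list containing x, summing an indicator at x yields f x
theorem pv_sum_indicator (f : Int → Int) (x : Int) :
    ∀ l : List Int, l.Nodup → x ∈ l →
      (l.map (fun u => if u = x then f u else 0)).sum = f x := by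
  intro l
  induction l with
  | nil => intro _ h; cases h
  | cons y ys ih =>
    intro hnd hmem
    rcases List.mem_cons.mp hmem with h | h
    · subst h
      have hx : x ∉ ys := (List.nodup_cons.mp hnd).1
      have : (ys.map (fun u => if u = x then f u else 0)).sum = 0 := by
        apply List.sum_eq_zero
        intro z hz
        rcases List.mem_map.mp hz with ⟨u, hu, rfl⟩
        have : u ≠ x := fun h => hx (h ▸ hu)
        simp [this]
      simp [this]
    · have hy : y ≠ x := by
        rintro rfl; exact (List.nodup_cons.mp hnd).1 h
      simp [hy, ih (List.nodup_cons.mp hnd).2 h]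

-- summing f over a list = summing count-weighted f over any nodup cover of its elements
theorem pv_sum_count (f : Int → Int) (team : List Int) :
    ∀ l : List Int, l.Nodup → (∀ y ∈ team, y ∈ l) →
      (team.map f).sum = (l.map (fun u => (team.count u : Int) * f u)).sum := by
  induction team with
  | nil =>
    intro l _ _
    simp
  | cons x t ih =>
    intro l hnd hcov
    have hx : x ∈ l := hcov x (List.mem_cons_self)
    have hct : ∀ y ∈ t, y ∈ l := fun y hy => hcov y (List.mem_cons_of_mem _ hy)
    have hsplit : (l.map (fun u => ((List.count u (x :: t) : Int)) * f u)).sum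
        = (l.map (fun u => (t.count u : Int) * f u)).sum
          + (l.map (fun u => if u = x then f u else 0)).sum := by
      rw [← List.sum_map_add]
      apply congrArg
      apply List.map_congr_left
      intro u _
      by_cases h : u = x
      · subst h; simp; ring
      · simp [h, Ne.symm h]
    rw [hsplit, pv_sum_indicator f x l hnd hx, ← ih l hnd hct]
    simp [add_comm]


-- pull a constant factor out of a mapped sum
theorem pv_sum_mul_left (a : Int) (f : Int → Int) (l : List Int) :
    (l.map (fun x => a * f x)).sum = a * (l.map f).sum := by
  induction l with
  | nil => simp
  | cons x xs ih => simp [ih]; ring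

-- A's per-team nested loops over the raw list equal B's count-weighted pass over distinct values
theorem pv_team_eq (arr : List (List Int)) (team : List Int) :
    team.foldl (fun s i =>
      team.foldl (fun s j => if i ≠ j then s + pvGetv arr i j else s) s) 0
      = pvTeamStat arr team := by
  unfold pvTeamStat
  rw [PySem.Dict.foldl_insert_getD_add_one_eq_counter]
  set keys := (PySem.Dict.counter team).keys with hkeys
  have hnd : keys.Nodup := PySem.Dict.nodup_keys_counter team
  have hcov : ∀ y ∈ team, y ∈ keys := by
    intro y hy
    rw [hkeys, PySem.Dict.keys_counter]
    exact (PySem.Set.mem_ofList team y).mpr hy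
  -- shorthand for the guarded entry
  set h : Int → Int → Int := fun i j => if i ≠ j then pvGetv arr i j else 0 with hh
  -- A as a double map-sum over team
  have hA : team.foldl (fun s i =>
      team.foldl (fun s j => if i ≠ j then s + pvGetv arr i j else s) s) 0
      = (team.map (fun i => (team.map (h i)).sum)).sum := by
    have hout : (fun (s : Int) i =>
        team.foldl (fun s j => if i ≠ j then s + pvGetv arr i j else s) s)
        = (fun s i => s + (team.map (h i)).sum) := by
      funext s i
      rw [pv_foldl_if_add (fun j => i ≠ j) (fun j => pvGetv arr i j) team s]
    rw [hout, pv_foldl_add_int]; simp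
  -- B as a double map-sum over keys
  have hB : keys.foldl (fun s u =>
      keys.foldl (fun s v =>
        if u ≠ v then s + (PySem.Dict.counter team).getD u 0
          * (PySem.Dict.counter team).getD v 0 * pvGetv arr u v else s) s) 0
      = (keys.map (fun u =>
          (keys.map (fun v => (team.count u : Int) * ((team.count v : Int) * h u v))).sum)).sum := by
    have hout : (fun (s : Int) u =>
        keys.foldl (fun s v =>
          if u ≠ v then s + (PySem.Dict.counter team).getD u 0
            * (PySem.Dict.counter team).getD v 0 * pvGetv arr u v else s) s)
        = (fun s u => s +
            (keys.map (fun v => (team.count u : Int) * ((team.count v : Int) * h u v))).sum) := by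
      funext s u
      rw [pv_foldl_if_add (fun v => u ≠ v)
        (fun v => (PySem.Dict.counter team).getD u 0
          * (PySem.Dict.counter team).getD v 0 * pvGetv arr u v) keys s]
      congr 1
      apply congrArg
      apply List.map_congr_left
      intro v _
      by_cases hne : u = v
      · simp [hh, hne]
      · simp [hh, hne, PySem.Dict.getD_counter]; ring
    rw [hout, pv_foldl_add_int]; simp
  rw [hA, hB]
  -- inner rewrite: Σ_{j∈team} h i j = Σ_{v∈keys} count v * h i v
  have hinner : (team.map (fun i => (team.map (h i)).sum)).sum
      = (team.map (fun i => (keys.map (fun v => (team.count v : Int) * h i v)).sum)).sum := by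
    apply congrArg
    apply List.map_congr_left
    intro i _
    exact pv_sum_count (h i) team keys hnd hcov
  rw [hinner,
    pv_sum_count (fun i => (keys.map (fun v => (team.count v : Int) * h i v)).sum) team keys hnd hcov]
  apply congrArg
  apply List.map_congr_left
  intro u _
  rw [← pv_sum_mul_left]

-- ===== VERDICT (by name: the statement is the Claim_ definition above) =====
theorem get_stat_diff_spec : Claim_equal_get_stat_diff := by
  intro arr start link _ _
  unfold Spec_get_stat_diff get_stat_diff get_stat_diff_alt
  rw [pv_team_eq arr start, pv_team_eq arr link]
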